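-- pv_equiv track=rewrite | github.com/smy37/Daily_Coding | 6th_DevContest/supplement/5_2.py | solution
-- ===== SOURCE A (Python) =====
-- def solution(N, A):
--     answer = 0
--     temp = 0
--     flag = True
--     while flag:
--         flag = False
--         cri = 0
--         for i in range(len(A)-1):
--             cri = min(A[i], A[i+1])
--             if cri!= 0:
--                 temp += cri
--                 A[i] -= cri
--                 A[i+1] -= cri
--                 flag = True
--     answer = sum(A) + temp
--     return answer
-- ===== SOURCE B (Python) =====
-- def solution(N, A):
--     # Pure two-scan computation (return value only; does not mutate A, unlike the original).
--     def sweep(xs):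
--         if not xs:
--             return [], 0
--         out = []
--         cur = xs[0]
--         saved = 0
--         for x in xs[1:]:
--             c = min(cur, x)
--             saved += c
--             out.append(cur - c)
--             cur = x - c
--         out.append(cur)
--         return out, saved
--     ys, s1 = sweep(A)
--     _, s2 = sweep(ys)
--     return sum(A) - s1 - s2
-- ===== Notes on version B (the rewrite author's own statement) =====
-- stated objective: faster
-- what changed: Replaces A's in-place 'while flag' fixpoint iteration over array indices with exactly two pure left-to-right carry scans (proved sufficient: a second scan's output is already a fixed point) and the closed-form total sum(A) - saved1 - saved2; B does not mutate A.
import Mathlib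
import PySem

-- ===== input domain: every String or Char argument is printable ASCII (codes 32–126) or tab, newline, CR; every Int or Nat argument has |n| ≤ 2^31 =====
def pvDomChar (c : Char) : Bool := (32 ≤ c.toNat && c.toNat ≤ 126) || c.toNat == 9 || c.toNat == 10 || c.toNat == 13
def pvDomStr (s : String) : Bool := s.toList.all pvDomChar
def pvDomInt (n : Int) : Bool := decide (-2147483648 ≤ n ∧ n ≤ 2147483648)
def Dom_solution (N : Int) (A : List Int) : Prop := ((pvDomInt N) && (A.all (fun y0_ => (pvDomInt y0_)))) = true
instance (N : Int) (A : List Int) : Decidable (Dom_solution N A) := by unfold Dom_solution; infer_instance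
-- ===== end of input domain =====

-- B replaces A's mutate-in-place fixpoint ('while flag') with two pure carry scans and a
-- closed-form total (equivalence is about the RETURN value only: A mutates its argument, B does not).

-- ===== PORT A =====
-- one pass of the Python 'for i in range(len(A)-1)' body; indices are always in range here,
-- so pyGetD/pySetD are exact for A[i], A[i] -= cri
def innerStep (st : List Int × Int × Bool) (i : Int) : List Int × Int × Bool :=
  let A := st.1
  let temp := st.2.1
  let flag := st.2.2
  let cri := min (PySem.List.pyGetD A i 0) (PySem.List.pyGetD A (i + 1) 0)
  if cri ≠ 0 then
    let A1 := PySem.List.pySetD A i (PySem.List.pyGetD A i 0 - cri)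
    let A2 := PySem.List.pySetD A1 (i + 1) (PySem.List.pyGetD A1 (i + 1) 0 - cri)
    (A2, temp + cri, true)
  else
    (A, temp, flag)

-- the 'while flag' loop; fuel-guarded for totality only: the Python loop provably stops
-- after at most 3 iterations (see the lemmas below), so fuel 4 is never exhausted
def whileLoopA : Nat → List Int → Int → List Int × Int
  | 0, A, temp => (A, temp)
  | fuel + 1, A, temp =>
      let st := (PySem.List.pyRange 0 ((A.length : Int) - 1) 1).foldl innerStep (A, temp, false)
      if st.2.2 then whileLoopA fuel st.1 st.2.1 else (st.1, st.2.1)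

def solution (N : Int) (A : List Int) : Int :=
  let st := whileLoopA 4 A 0
  st.1.sum + st.2

-- ===== PORT B =====
-- Source B's sweep: left-to-right carry scan; out is built by appends, cur is the running left value
def sweepGo : Int → List Int → List Int → Int → List Int × Int
  | cur, [], out, saved => (out ++ [cur], saved)
  | cur, x :: rest, out, saved =>
      let c := min cur x
      sweepGo (x - c) rest (out ++ [cur - c]) (saved + c)

def sweepB : List Int → List Int × Int
  | [] => ([], 0)
  | x :: rest => sweepGo x rest [] 0

def solution_alt (N : Int) (A : List Int) : Int :=
  let p1 := sweepB A
  let p2 := sweepB p1.1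
  A.sum - p1.2 - p2.2

-- ===== PRECONDITION & SPEC =====
def Spec_solution (N : Int) (A : List Int) (out : Int) : Prop := out = solution_alt N A
instance (N : Int) (A : List Int) (out : Int) : Decidable (Spec_solution N A out) := by unfold Spec_solution; infer_instance

-- ===== CLAIM (what is proved, stated in full; the proofs are below) =====
def Claim_equal_solution : Prop := ∀ (N : Int) (A : List Int), Dom_solution N A → Spec_solution N A (solution N A)

-- ===== LEMMAS AND PROOFS =====

-- proof-side carry scan that additionally tracks Python's 'flag' (whether any cri ≠ 0 fired)
def fscan : Int → List Int → List Int × Int × Bool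
  | cur, [] => ([cur], 0, false)
  | cur, x :: rest =>
      let c := min cur x
      let r := fscan (x - c) rest
      ((cur - c) :: r.1, c + r.2.1, decide (c ≠ 0) || r.2.2)

lemma sweepGo_eq_fscan : ∀ (xs : List Int) (cur : Int) (out : List Int) (saved : Int),
    sweepGo cur xs out saved = (out ++ (fscan cur xs).1, saved + (fscan cur xs).2.1) := by
  intro xs
  induction xs with
  | nil => intro cur out saved; simp [sweepGo, fscan]
  | cons x rest ih =>
      intro cur out saved
      simp only [sweepGo, fscan, ih]
      simp [List.append_assoc, add_assoc]

lemma sweepB_eq_fscan (x : Int) (rest : List Int) :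
    sweepB (x :: rest) = ((fscan x rest).1, (fscan x rest).2.1) := by
  simp [sweepB, sweepGo_eq_fscan]

lemma getD_append_len (P : List Int) (y : Int) (r : List Int) (d : Int) :
    (P ++ y :: r).getD P.length d = y := by
  induction P with
  | nil => simp
  | cons p ps ih => simpa using ih

lemma set_append_len (P : List Int) (y v : Int) (r : List Int) :
    (P ++ y :: r).set P.length v = P ++ v :: r := by
  induction P with
  | nil => simp
  | cons p ps ih => simpa using ih

lemma innerStep_eval (P : List Int) (cur x : Int) (rest : List Int) (temp : Int) (flag : Bool) :
    innerStep (P ++ cur :: x :: rest, temp, flag) (P.length : Int)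
      = (P ++ (cur - min cur x) :: (x - min cur x) :: rest,
         temp + min cur x, flag || decide (min cur x ≠ 0)) := by
  have hcast : ((P.length : Int) + 1) = ((P.length + 1 : Nat) : Int) := by push_cast; ring
  have h1 : PySem.List.pyGetD (P ++ cur :: x :: rest) (P.length : Int) 0 = cur := by
    rw [PySem.List.pyGetD_natCast, getD_append_len]
  have h2 : PySem.List.pyGetD (P ++ cur :: x :: rest) ((P.length : Int) + 1) 0 = x := by
    rw [hcast, PySem.List.pyGetD_natCast]
    have : (P ++ cur :: x :: rest).getD (P ++ [cur]).length 0 = x := by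
      have := getD_append_len (P ++ [cur]) x rest 0
      simpa using this
    simpa using this
  unfold innerStep
  simp only [h1, h2]
  by_cases hc : min cur x = 0
  · simp [hc]
  · have hset1 : PySem.List.pySetD (P ++ cur :: x :: rest) (P.length : Int) (cur - min cur x)
        = P ++ (cur - min cur x) :: x :: rest := by
      rw [PySem.List.pySetD_natCast, set_append_len]
    have h3 : PySem.List.pyGetD (P ++ (cur - min cur x) :: x :: rest) ((P.length : Int) + 1) 0 = x := by
      rw [hcast, PySem.List.pyGetD_natCast]
      have := getD_append_len (P ++ [cur - min cur x]) x rest 0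
      simpa using this
    have hset2 : PySem.List.pySetD (P ++ (cur - min cur x) :: x :: rest) ((P.length : Int) + 1)
          (x - min cur x) = P ++ (cur - min cur x) :: (x - min cur x) :: rest := by
      rw [hcast, PySem.List.pySetD_natCast]
      have := set_append_len (P ++ [cur - min cur x]) x (x - min cur x) rest
      simpa using this
    simp [hc, hset1, h3, hset2]

-- the indexed Python inner loop over positions P.length .. P.length+rest.length-1 is the carry scan
lemma inner_eq : ∀ (rest P : List Int) (cur temp : Int) (flag : Bool),
    (PySem.List.pyRange (P.length : Int) ((P.length : Int) + (rest.length : Int)) 1).foldl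
        innerStep (P ++ cur :: rest, temp, flag)
      = (P ++ (fscan cur rest).1, temp + (fscan cur rest).2.1, flag || (fscan cur rest).2.2) := by
  intro rest
  induction rest with
  | nil =>
      intro P cur temp flag
      simp [PySem.List.pyRange_zero, fscan]
  | cons x rest' ih =>
      intro P cur temp flag
      have hlt : (P.length : Int) < (P.length : Int) + ((x :: rest').length : Int) := by
        simp
      rw [PySem.List.pyRange_one_cons hlt]
      simp only [List.foldl_cons, innerStep_eval]
      have hrange : (PySem.List.pyRange ((P.length : Int) + 1)
            ((P.length : Int) + ((x :: rest').length : Int)) 1)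
          = PySem.List.pyRange (((P ++ [cur - min cur x]).length : Int))
            (((P ++ [cur - min cur x]).length : Int) + (rest'.length : Int)) 1 := by
        have e1 : ((P.length : Int) + 1) = (((P ++ [cur - min cur x]).length : Int)) := by
          simp only [List.length_append, List.length_cons, List.length_nil]; omega
        have e2 : ((P.length : Int) + ((x :: rest').length : Int))
            = (((P ++ [cur - min cur x]).length : Int) + (rest'.length : Int)) := by
          simp only [List.length_append, List.length_cons, List.length_nil]; omega
        rw [e1, e2]
      have hlist : P ++ (cur - min cur x) :: (x - min cur x) :: rest'
          = (P ++ [cur - min cur x]) ++ (x - min cur x) :: rest' := by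
        simp
      rw [hrange, hlist, ih]
      simp only [fscan]
      simp [add_assoc, Bool.or_assoc]

-- basic facts about fscan
lemma fscan_len : ∀ (xs : List Int) (cur : Int), (fscan cur xs).1.length = xs.length + 1 := by
  intro xs; induction xs with
  | nil => intro cur; simp [fscan]
  | cons x r ih => intro cur; simp [fscan, ih]

lemma fscan_sum : ∀ (xs : List Int) (cur : Int),
    (fscan cur xs).1.sum = cur + xs.sum - 2 * (fscan cur xs).2.1 := by
  intro xs; induction xs with
  | nil => intro cur; simp [fscan]
  | cons x r ih => intro cur; simp [fscan, ih]; ring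

lemma fscan_flag_false : ∀ (xs : List Int) (cur : Int), (fscan cur xs).2.2 = false →
    (fscan cur xs).1 = cur :: xs ∧ (fscan cur xs).2.1 = 0 := by
  intro xs; induction xs with
  | nil => intro cur _; simp [fscan]
  | cons x r ih =>
      intro cur h
      simp only [fscan, Bool.or_eq_false_iff, decide_eq_false_iff_not, not_not] at h
      obtain ⟨hc, hf⟩ := h
      obtain ⟨h1, h2⟩ := ih (x - min cur x) hf
      simp only [fscan]
      rw [hc] at h1 h2 ⊢
      simp at h1 h2
      simp [h1, h2]

lemma fscan_nonneg : ∀ (xs : List Int) (cur : Int), xs ≠ [] →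
    ∀ y ∈ (fscan cur xs).1, 0 ≤ y := by
  intro xs
  induction xs with
  | nil => intro _ h; exact absurd rfl h
  | cons x r ih =>
      intro cur _ y hy
      simp only [fscan, List.mem_cons] at hy
      rcases hy with h | h
      · have : min cur x ≤ cur := min_le_left _ _
        omega
      · cases r with
        | nil =>
            simp [fscan] at h
            have : min cur x ≤ x := min_le_right _ _
            omega
        | cons z zs => exact ih (x - min cur x) (by simp) y h

lemma fscan_chain : ∀ (xs : List Int) (cur : Int), 0 ≤ cur → (∀ y ∈ xs, 0 ≤ y) →
    List.IsChain (fun a b => min a b = 0) (fscan cur xs).1 := by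
  intro xs
  induction xs with
  | nil => intro cur _ _; simp [fscan]
  | cons x r ih =>
      intro cur hcur hxs
      have hx : 0 ≤ x := hxs x (by simp)
      have hr : ∀ y ∈ r, 0 ≤ y := fun y hy => hxs y (by simp [hy])
      have hnext : 0 ≤ x - min cur x := by
        have : min cur x ≤ x := min_le_right _ _; omega
      have htail := ih (x - min cur x) hnext hr
      simp only [fscan]
      -- head of the recursive output
      have hhead : ∀ h0 t, (fscan (x - min cur x) r).1 = h0 :: t →
          min (cur - min cur x) h0 = 0 := by
        intro h0 t heq
        have h0nn : 0 ≤ h0 := by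
          cases r with
          | nil => simp [fscan] at heq; omega
          | cons z zs =>
              exact fscan_nonneg (z :: zs) (x - min cur x) (by simp) h0
                (by rw [heq]; simp)
        have h0top : min cur x = x → h0 = 0 := by
          intro hmx
          cases r with
          | nil => simp [fscan] at heq; omega
          | cons z zs =>
              have hz : 0 ≤ z := hr z (by simp)
              simp only [fscan] at heq
              have : min (x - min cur x) z = 0 := by rw [hmx]; simp [hz]
              rw [hmx] at heq
              simp [this] at heq
              omega
        rcases min_cases cur x with ⟨hm, _⟩ | ⟨hm, _⟩
        · rw [hm]; simp [h0nn]
        · have := h0top hm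
          have hcc : 0 ≤ cur - min cur x := by
            have : min cur x ≤ cur := min_le_left _ _; omega
          rw [this]; simp [hcc]
      cases hfe : (fscan (x - min cur x) r).1 with
      | nil => simp
      | cons h0 t =>
          rw [hfe] at htail
          exact List.isChain_cons_cons.mpr ⟨hhead h0 t hfe, htail⟩

lemma fscan_idle : ∀ (xs : List Int) (cur : Int),
    List.IsChain (fun a b => min a b = 0) (cur :: xs) →
    fscan cur xs = (cur :: xs, 0, false) := by
  intro xs
  induction xs with
  | nil => intro cur _; simp [fscan]
  | cons x r ih =>
      intro cur hch
      have h0 : min cur x = 0 := (List.isChain_cons_cons.mp hch).1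
      have := ih x (List.isChain_cons_cons.mp hch).2
      simp only [fscan, h0]
      simp [this]

-- one full Python sweep (the foldl over range(len(A)-1)) on a cons list
lemma sweep_eq (cur : Int) (rest : List Int) (temp : Int) :
    (PySem.List.pyRange 0 (((cur :: rest).length : Int) - 1) 1).foldl
        innerStep (cur :: rest, temp, false)
      = ((fscan cur rest).1, temp + (fscan cur rest).2.1, (fscan cur rest).2.2) := by
  have h := inner_eq rest [] cur temp false
  simpa using h

-- one unfolding of the while loop on a cons list
lemma whileLoopA_step (fuel : Nat) (cur : Int) (rest : List Int) (temp : Int) :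
    whileLoopA (fuel + 1) (cur :: rest) temp
      = (if (fscan cur rest).2.2 then
           whileLoopA fuel (fscan cur rest).1 (temp + (fscan cur rest).2.1)
         else ((fscan cur rest).1, temp + (fscan cur rest).2.1)) := by
  simp only [whileLoopA]
  rw [sweep_eq]

-- ===== VERDICT (by name: the statement is the Claim_ definition above) =====
theorem solution_spec : Claim_equal_solution := by
  intro N A _
  unfold Spec_solution solution solution_alt
  cases A with
  | nil =>
      simp [whileLoopA, sweepB, PySem.List.pyRange]
  | cons cur rest =>
      rw [sweepB_eq_fscan]
      rw [show (4 : Nat) = 3 + 1 from rfl, whileLoopA_step]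
      cases hf1 : (fscan cur rest).2.2 with
      | false =>
          obtain ⟨hl1, hs1⟩ := fscan_flag_false rest cur hf1
          simp [hl1, hs1, sweepB_eq_fscan]
      | true =>
          have hrest : rest ≠ [] := by
            intro h; rw [h] at hf1; simp [fscan] at hf1
          have hlen : (fscan cur rest).1.length = rest.length + 1 := fscan_len rest cur
          obtain ⟨b, bs, hys⟩ : ∃ b bs, (fscan cur rest).1 = b :: bs := by
            cases h : (fscan cur rest).1 with
            | nil => rw [h] at hlen; simp at hlen
            | cons b bs => exact ⟨b, bs, rfl⟩
          have hys_nonneg : ∀ y ∈ (fscan cur rest).1, 0 ≤ y := fscan_nonneg rest cur hrest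
          have hsum1 := fscan_sum rest cur
          simp only [if_true]
          rw [hys, show (3 : Nat) = 2 + 1 from rfl, whileLoopA_step, sweepB_eq_fscan]
          cases hf2 : (fscan b bs).2.2 with
          | false =>
              obtain ⟨hl2, hs2⟩ := fscan_flag_false bs b hf2
              rw [hys] at hsum1
              simp [hs2, hl2]
              simp at hsum1
              omega
          | true =>
              have hb : 0 ≤ b := hys_nonneg b (by rw [hys]; simp)
              have hbs : ∀ y ∈ bs, 0 ≤ y := fun y hy => hys_nonneg y (by rw [hys]; simp [hy])
              have hch : List.IsChain (fun a b => min a b = 0) (fscan b bs).1 :=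
                fscan_chain bs b hb hbs
              have hlen2 : (fscan b bs).1.length = bs.length + 1 := fscan_len bs b
              obtain ⟨c, cs, hzs⟩ : ∃ c cs, (fscan b bs).1 = c :: cs := by
                cases h : (fscan b bs).1 with
                | nil => rw [h] at hlen2; simp at hlen2
                | cons c cs => exact ⟨c, cs, rfl⟩
              have hsum2 := fscan_sum bs b
              rw [hzs] at hch
              have hidle := fscan_idle cs c hch
              rw [hys] at hsum1
              rw [hzs] at hsum2
              simp only [hf2, if_true]
              rw [hzs, show (2 : Nat) = 1 + 1 from rfl, whileLoopA_step, hidle]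
              simp
              simp at hsum1 hsum2
              omega
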